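-- pv_equiv track=rewrite | github.com/dejongch/aoc2023 | Day7/part2.py | convert_to_base_10
-- ===== SOURCE A (Python) =====
-- alphabet = "J23456789TQKA"
--
-- def convert_to_base_10(hand):
--     # Reverse the poker hand string to simplify indexing
--     reversed_str = hand[::-1]
--
--     base_10_number = 0
--     base = 13
--
--     for index, char in enumerate(reversed_str):
--         # Find the index of the character in the alphabet
--         char_index = alphabet.index(char)
--         # Convert to base 10 using the formula: base^index * char_index
--         base_10_number += (base ** index) * char_index
--
--     return base_10_number
-- ===== SOURCE B (Python) =====
-- alphabet = "J23456789TQKA"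
-- # digit table built once: char -> position in alphabet
-- DIGIT = {c: i for i, c in enumerate(alphabet)}
--
-- def convert_to_base_10(hand):
--     # Recursive Horner on the prefix: value(hand) = value(hand[:-1]) * 13 + digit(last char)
--     if hand == "":
--         return 0
--     return convert_to_base_10(hand[:-1]) * 13 + DIGIT[hand[-1]]
-- ===== Notes on version B (the rewrite author's own statement) =====
-- stated objective: alternative
-- what changed: Replaces the reverse-enumerate-and-exponentiate loop (base**index * alphabet.index(char) summed over the reversed string) with a recursive Horner decomposition value(hand) = 13*value(hand[:-1]) + digit(last), using a dict digit table built once instead of alphabet.index.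
import Mathlib
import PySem

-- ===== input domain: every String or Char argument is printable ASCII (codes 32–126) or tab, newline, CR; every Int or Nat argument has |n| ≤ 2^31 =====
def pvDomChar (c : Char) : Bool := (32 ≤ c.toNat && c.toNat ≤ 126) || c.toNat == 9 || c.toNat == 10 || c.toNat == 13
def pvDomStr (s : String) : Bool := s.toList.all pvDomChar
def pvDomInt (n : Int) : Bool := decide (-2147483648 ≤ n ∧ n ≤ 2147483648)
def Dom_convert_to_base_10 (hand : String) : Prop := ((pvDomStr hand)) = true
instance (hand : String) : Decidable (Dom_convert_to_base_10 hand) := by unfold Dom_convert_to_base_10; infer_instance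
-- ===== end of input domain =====

-- B replaces the reverse/enumerate/base**index loop with a recursive Horner decomposition
-- value(hand) = 13 * value(hand[:-1]) + digit(last char), digit looked up in a dict built once.

def pvAlphabet : List Char := ['J','2','3','4','5','6','7','8','9','T','Q','K','A']

-- ===== PORT A =====
-- alphabet.index(char); total form via getD, exact under Pre_ (char ∈ alphabet)
def pvDigit (c : Char) : Int := ((PySem.List.index? pvAlphabet c).getD 0 : Nat)

-- hand[::-1] is the full reversal (exact: slice with step -1 = List.reverse);
-- the loop over enumerate(reversed_str) adds base**index * char_index each step.
def convert_to_base_10 (hand : String) : Int :=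
  (PySem.List.enumerate hand.toList.reverse 0).foldl
    (fun acc p => acc + (13 : Int) ^ p.1.toNat * pvDigit p.2) 0

-- ===== PORT B =====
-- DIGIT = {c: i for i, c in enumerate(alphabet)}
def pvDigitDict : PySem.Dict Char Int :=
  (PySem.List.enumerate pvAlphabet 0).foldl (fun d p => d.insert p.2 p.1) PySem.Dict.empty

-- recursion on hand[:-1] / hand[-1], encoded as structural recursion on the reversed
-- character list (head = last char, tail = the reversed prefix); DIGIT[c] is a dict
-- lookup (KeyError, i.e. none, cannot occur under Pre_; getD 0 is exact there)
def pvHornerRec : List Char → Int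
  | [] => 0
  | c :: rest => pvHornerRec rest * 13 + (pvDigitDict.get? c).getD 0

def convert_to_base_10_alt (hand : String) : Int :=
  pvHornerRec hand.toList.reverse

-- ===== PRECONDITION & SPEC =====
-- A raises ValueError (alphabet.index) on any character outside the 13-card alphabet pvAlphabet; exactly those inputs are excluded.
def Pre_convert_to_base_10 (hand : String) : Prop := hand.toList.all (fun c => pvAlphabet.contains c) = true
instance (hand : String) : Decidable (Pre_convert_to_base_10 hand) := by unfold Pre_convert_to_base_10; infer_instance
def pvWitness_convert_to_base_10 : String := ("KTJ32")

def Spec_convert_to_base_10 (hand : String) (out : Int) : Prop := out = convert_to_base_10_alt hand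
instance (hand : String) (out : Int) : Decidable (Spec_convert_to_base_10 hand out) := by unfold Spec_convert_to_base_10; infer_instance

-- ===== CLAIM (what is proved, stated in full; the proofs are below) =====
def Claim_equal_convert_to_base_10 : Prop := ∀ (hand : String), Dom_convert_to_base_10 hand → Pre_convert_to_base_10 hand → Spec_convert_to_base_10 hand (convert_to_base_10 hand)

-- ===== LEMMAS AND PROOFS =====

-- value of A's fold starting at index s: pvG xs s = Σ_k 13^(s+k) * digit xs[k]
def pvG : List Char → Nat → Int
  | [], _ => 0
  | x :: xs, s => (13 : Int) ^ s * pvDigit x + pvG xs (s + 1)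

theorem pvG_shift (xs : List Char) : ∀ s : Nat, pvG xs (s + 1) = 13 * pvG xs s := by
  induction xs with
  | nil => intro s; simp [pvG]
  | cons x xs ih =>
      intro s
      simp only [pvG, ih]
      ring

theorem pvFoldA_eq_pvG (xs : List Char) : ∀ (s : Nat) (a : Int),
    (PySem.List.enumerate xs (s : Int)).foldl
      (fun acc p => acc + (13 : Int) ^ p.1.toNat * pvDigit p.2) a = a + pvG xs s := by
  induction xs with
  | nil => intro s a; simp [PySem.List.enumerate_nil, pvG]
  | cons x xs ih =>
      intro s a
      rw [PySem.List.enumerate_cons]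
      have h1 : ((s : Int) + 1) = ((s + 1 : Nat) : Int) := by push_cast; ring
      simp only [List.foldl_cons, h1, ih, pvG, Int.toNat_natCast]
      ring

-- the two digit functions agree on every alphabet character (13 concrete cases)
theorem pvDigit_agree : ∀ c ∈ pvAlphabet, (pvDigitDict.get? c).getD 0 = pvDigit c := by
  intro c hc
  fin_cases hc <;> decide

theorem pvHornerRec_eq_pvG (xs : List Char) (h : ∀ c ∈ xs, c ∈ pvAlphabet) :
    pvHornerRec xs = pvG xs 0 := by
  induction xs with
  | nil => simp [pvHornerRec, pvG]
  | cons x xs ih =>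
      have hx : x ∈ pvAlphabet := h x (List.mem_cons_self ..)
      have hxs : ∀ c ∈ xs, c ∈ pvAlphabet := fun c hc => h c (List.mem_cons_of_mem _ hc)
      simp only [pvHornerRec, pvG, ih hxs, pvDigit_agree x hx, pvG_shift]
      ring

-- ===== VERDICT (by name: the statement is the Claim_ definition above) =====
theorem convert_to_base_10_spec : Claim_equal_convert_to_base_10 := by
  intro hand _ hpre
  unfold Spec_convert_to_base_10 convert_to_base_10 convert_to_base_10_alt
  have hmem : ∀ c ∈ hand.toList.reverse, c ∈ pvAlphabet := by
    intro c hc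
    have hc' : c ∈ hand.toList := List.mem_reverse.mp hc
    have := (List.all_eq_true.mp hpre) c hc'
    simpa [List.contains_iff_mem] using this
  have hA := pvFoldA_eq_pvG hand.toList.reverse 0 0
  simp only [Nat.cast_zero] at hA
  rw [hA, pvHornerRec_eq_pvG _ hmem]
  ring
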